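-- pv_equiv track=rewrite | github.com/andreysiniy/fisher-bot | fish/helpers/log_checker.py | format_stats_output
-- ===== SOURCE A (Python) =====
-- from collections import defaultdict, OrderedDict
--
-- reward_order = [
--     "total",
--     "nothing",
--     "points",
--     "points_negative",
--     "percentage_points",
--     "percentage_points_negative",
--     "robbery",
--     "dupe",
--     "russian_roulette",
--     "timeout"
-- ]
--
-- def format_stats_output(stats_data):
--     formatted_output = OrderedDict()
--     for channel, users in stats_data.items():
--
--         sorted_users = sorted(users.items(), key=lambda item: item[1].get("total", 0), reverse=True)
--
--         channel_dict = OrderedDict()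
--         for user, counts in sorted_users:
--             sorted_counts = OrderedDict()
--
--             for key in reward_order:
--                 if key in counts:
--                     sorted_counts[key] = counts[key]
--
--             for key in sorted(counts.keys()):
--                 if key not in sorted_counts:
--                     sorted_counts[key] = counts[key]
--             channel_dict[user] = sorted_counts
--         formatted_output[channel] = channel_dict
--     return formatted_output
-- ===== SOURCE B (Python) =====
-- from collections import OrderedDict
--
-- reward_order = [
--     "total",
--     "nothing",
--     "points",
--     "points_negative",
--     "percentage_points",
--     "percentage_points_negative",
--     "robbery",
--     "dupe",
--     "russian_roulette",
--     "timeout"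
-- ]
--
-- def format_stats_output(stats_data):
--     rank = {k: i for i, k in enumerate(reward_order)}
--     n = len(reward_order)
--
--     def key_order(counts):
--         # one sort under a composite key replaces A's two fill-in passes
--         return sorted(counts, key=lambda k: (rank.get(k, n), k))
--
--     return OrderedDict(
--         (channel, OrderedDict(
--             (user, OrderedDict((k, counts[k]) for k in key_order(counts)))
--             for user, counts in sorted(users.items(),
--                                        key=lambda it: it[1].get("total", 0),
--                                        reverse=True)))
--         for channel, users in stats_data.items())
-- ===== Notes on version B (the rewrite author's own statement) =====
-- stated objective: simpler
-- what changed: A incrementally fills OrderedDicts with explicit loops and two inner passes per user (a reward_order scan, then an alphabetical fill-in loop with a membership test); B is a declarative nested comprehension that orders each user's keys by ONE sort under a composite key (precomputed rank in reward_order with len(reward_order) as default, then the key) and builds each dict directly from that sequence.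
import Mathlib
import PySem

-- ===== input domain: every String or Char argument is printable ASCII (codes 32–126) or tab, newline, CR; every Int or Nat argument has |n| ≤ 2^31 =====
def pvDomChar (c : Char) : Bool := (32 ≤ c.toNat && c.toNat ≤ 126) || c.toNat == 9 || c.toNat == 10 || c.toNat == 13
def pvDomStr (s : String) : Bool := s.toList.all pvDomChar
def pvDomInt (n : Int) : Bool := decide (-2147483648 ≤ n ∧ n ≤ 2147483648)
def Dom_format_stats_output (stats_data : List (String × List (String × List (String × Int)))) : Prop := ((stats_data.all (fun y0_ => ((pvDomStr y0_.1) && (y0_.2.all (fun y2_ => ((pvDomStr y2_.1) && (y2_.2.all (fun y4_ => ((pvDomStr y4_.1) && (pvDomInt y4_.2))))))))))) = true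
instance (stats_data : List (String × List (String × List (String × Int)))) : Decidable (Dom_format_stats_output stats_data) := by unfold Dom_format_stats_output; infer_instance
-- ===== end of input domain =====

-- B replaces A's loop-and-fill construction (two inner passes per user: reward_order scan,
-- then alphabetical fill-in) by a declarative nested comprehension whose key order comes from
-- ONE sort under a composite (rank-in-reward_order with default, key) key; objective: simpler.

-- ===== PORT A =====
def pvRewardOrder : List String :=
  ["total", "nothing", "points", "points_negative", "percentage_points",
   "percentage_points_negative", "robbery", "dupe", "russian_roulette", "timeout"]

def format_stats_output (stats_data : List (String × List (String × List (String × Int)))) : List (String × List (String × List (String × Int))) :=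
  (stats_data.foldl (fun formatted_output cu =>
      let sorted_users := PySem.List.sorted cu.2 (fun item => (PySem.Dict.mk item.2).getD "total" 0) true
      let channel_dict := (sorted_users.foldl (fun cd uc =>
          let counts : PySem.Dict String Int := PySem.Dict.mk uc.2
          let sc1 := (pvRewardOrder.foldl (fun sc key =>
              if counts.contains key then sc.insert key (counts.getD key 0) else sc)
            (PySem.Dict.empty : PySem.Dict String Int))
          let sc2 := ((PySem.List.sorted counts.keys (fun k => k) false).foldl (fun sc key =>
              if sc.contains key then sc else sc.insert key (counts.getD key 0)) sc1)
          cd.insert uc.1 sc2.items)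
        (PySem.Dict.empty : PySem.Dict String (List (String × Int))))
      formatted_output.insert cu.1 channel_dict.items)
    (PySem.Dict.empty : PySem.Dict String (List (String × List (String × Int))))).items

-- ===== PORT B =====
-- Source B builds the result as one nested comprehension over dicts whose keys are distinct (Pre_),
-- so each OrderedDict-from-a-sequence-of-distinct-keys is the sequence itself: nested List.map.
def format_stats_output_alt (stats_data : List (String × List (String × List (String × Int)))) : List (String × List (String × List (String × Int))) :=
  let rank : PySem.Dict String Int :=
    PySem.Dict.ofList ((PySem.List.enumerate pvRewardOrder).map (fun p => (p.2, p.1)))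
  let n : Int := (pvRewardOrder.length : Int)
  let key_order : List (String × Int) → List String := fun counts =>
    PySem.List.sorted2 (counts.map Prod.fst) (fun k => rank.getD k n) (fun k => k) false
  stats_data.map (fun cu =>
    (cu.1,
      (PySem.List.sorted cu.2 (fun it => (PySem.Dict.mk it.2).getD "total" 0) true).map
        (fun uc =>
          (uc.1, (key_order uc.2).map (fun k => (k, (PySem.Dict.mk uc.2).getD k 0))))))

-- ===== PRECONDITION & SPEC =====
-- Pre_ excludes association lists with duplicate keys at any of the three dict levels:
-- such a list represents no Python dict (all three levels are dicts in the Python programs),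
-- so neither program's behaviour there is specified.
def Pre_format_stats_output (stats_data : List (String × List (String × List (String × Int)))) : Prop :=
  (stats_data.map Prod.fst).Nodup ∧
    ∀ c ∈ stats_data, (c.2.map Prod.fst).Nodup ∧ ∀ u ∈ c.2, (u.2.map Prod.fst).Nodup
instance (stats_data : List (String × List (String × List (String × Int)))) : Decidable (Pre_format_stats_output stats_data) := by unfold Pre_format_stats_output; infer_instance

def pvWitness_format_stats_output : (List (String × List (String × List (String × Int)))) :=
  [("chan", [("bob", [("total", 3), ("alpha", 2)]), ("amy", [("points", 1)])])]

def Spec_format_stats_output (stats_data : List (String × List (String × List (String × Int)))) (out : List (String × List (String × List (String × Int)))) : Prop := out = format_stats_output_alt stats_data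
instance (stats_data : List (String × List (String × List (String × Int)))) (out : List (String × List (String × List (String × Int)))) : Decidable (Spec_format_stats_output stats_data out) := by unfold Spec_format_stats_output; infer_instance

-- ===== CLAIM (what is proved, stated in full; the proofs are below) =====
def Claim_equal_format_stats_output : Prop := ∀ (stats_data : List (String × List (String × List (String × Int)))), Dom_format_stats_output stats_data → Pre_format_stats_output stats_data → Spec_format_stats_output stats_data (format_stats_output stats_data)

-- ===== LEMMAS AND PROOFS =====

-- A's inner two loops, named so the proof can speak about one user's counts in isolation
def pvInnerA (counts : List (String × Int)) : List (String × Int) :=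
  let cd : PySem.Dict String Int := PySem.Dict.mk counts
  let sc1 := (pvRewardOrder.foldl (fun sc key =>
      if cd.contains key then sc.insert key (cd.getD key 0) else sc)
    (PySem.Dict.empty : PySem.Dict String Int))
  ((PySem.List.sorted cd.keys (fun k => k) false).foldl (fun sc key =>
      if sc.contains key then sc else sc.insert key (cd.getD key 0)) sc1).items

-- B's inner value for one user's counts
def pvInnerB (counts : List (String × Int)) : List (String × Int) :=
  (PySem.List.sorted2 (counts.map Prod.fst)
      (fun k => (PySem.Dict.ofList ((PySem.List.enumerate pvRewardOrder).map (fun p => (p.2, p.1)))).getD k (pvRewardOrder.length : Int))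
      (fun k => k) false).map
    (fun k => (k, (PySem.Dict.mk counts).getD k 0))

-- building a dict by inserting fresh distinct keys and reading items back is List.map
lemma pvDictbuild_eq_map {α β : Type} (l : List (String × α)) (g : String × α → β)
    (h : (l.map Prod.fst).Nodup) :
    (l.foldl (fun d p => d.insert p.1 (g p)) (PySem.Dict.empty : PySem.Dict String β)).items
      = l.map (fun p => (p.1, g p)) := by
  have := PySem.Dict.items_foldl_insert_fresh (l := l) (k := Prod.fst) (v := g)
    (d := (PySem.Dict.empty : PySem.Dict String β))
    (fun a _ => PySem.Dict.contains_empty a.1) h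
  simpa using this

-- the boolean comparison sorted2 inserts by
def pvLt2 {κ₁ κ₂ : Type} [LT κ₁] [DecidableLT κ₁] [LT κ₂] [DecidableLT κ₂]
    (k1 : String → κ₁) (k2 : String → κ₂) (a b : String) : Bool :=
  decide (k1 a < k1 b) || !decide (k1 b < k1 a) && decide (k2 a < k2 b)

lemma sorted2_eq_foldl {κ₁ κ₂ : Type} [LT κ₁] [DecidableLT κ₁] [LT κ₂] [DecidableLT κ₂]
    (xs : List String) (k1 : String → κ₁) (k2 : String → κ₂) :
    PySem.List.sorted2 xs k1 k2 false
      = xs.foldl (fun acc x => PySem.List.insertBy (pvLt2 k1 k2) x acc) [] := rfl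

lemma pvLt2_trans {κ₁ κ₂ : Type} [LinearOrder κ₁] [LinearOrder κ₂]
    (k1 : String → κ₁) (k2 : String → κ₂) (a b c : String)
    (hab : pvLt2 k1 k2 a b = true) (hbc : pvLt2 k1 k2 b c = true) :
    pvLt2 k1 k2 a c = true := by
  simp only [pvLt2, Bool.or_eq_true, Bool.and_eq_true, Bool.not_eq_true', decide_eq_true_eq,
    decide_eq_false_iff_not, not_lt] at *
  rcases hab with h1 | ⟨h1, h1'⟩ <;> rcases hbc with h2 | ⟨h2, h2'⟩
  · exact Or.inl (lt_trans h1 h2)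
  · exact Or.inl (lt_of_lt_of_le h1 h2)
  · exact Or.inl (lt_of_le_of_lt h1 h2)
  · exact Or.inr ⟨le_trans h1 h2, lt_trans h1' h2'⟩

lemma pvLt2_asymm {κ₁ κ₂ : Type} [LinearOrder κ₁] [LinearOrder κ₂]
    (k1 : String → κ₁) (k2 : String → κ₂) (a b : String)
    (hab : pvLt2 k1 k2 a b = true) (hba : pvLt2 k1 k2 b a = true) : False := by
  simp only [pvLt2, Bool.or_eq_true, Bool.and_eq_true, Bool.not_eq_true', decide_eq_true_eq,
    decide_eq_false_iff_not, not_lt] at *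
  rcases hab with h1 | ⟨h1, h1'⟩ <;> rcases hba with h2 | ⟨h2, h2'⟩
  · exact absurd h2 (lt_asymm h1)
  · exact absurd h2 (not_le.mpr h1)
  · exact absurd h1 (not_le.mpr h2)
  · exact absurd h2' (lt_asymm h1')

lemma pvLt2_total {κ₁ κ₂ : Type} [LinearOrder κ₁] [LinearOrder κ₂]
    (k1 : String → κ₁) (k2 : String → κ₂) (a b : String) (h : k2 a ≠ k2 b) :
    pvLt2 k1 k2 a b = true ∨ pvLt2 k1 k2 b a = true := by
  simp only [pvLt2, Bool.or_eq_true, Bool.and_eq_true, Bool.not_eq_true', decide_eq_true_eq,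
    decide_eq_false_iff_not, not_lt]
  rcases lt_trichotomy (k1 a) (k1 b) with h1 | h1 | h1
  · exact Or.inl (Or.inl h1)
  · rcases lt_or_gt_of_ne h with h2 | h2
    · exact Or.inl (Or.inr ⟨le_of_eq h1, h2⟩)
    · exact Or.inr (Or.inr ⟨le_of_eq h1.symm, h2⟩)
  · exact Or.inr (Or.inl h1)

lemma insertBy_cons (before : String → String → Bool) (x y : String) (ys : List String) :
    PySem.List.insertBy before x (y :: ys)
      = if before x y then x :: y :: ys else y :: PySem.List.insertBy before x ys := rfl

lemma insertBy_perm_pairwise (before : String → String → Bool)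
    (htrans : ∀ a b c, before a b = true → before b c = true → before a c = true)
    (x : String) :
    ∀ (acc : List String), acc.Pairwise (fun a b => before a b = true) →
      (∀ y ∈ acc, before x y = true ∨ before y x = true) →
      (PySem.List.insertBy before x acc).Perm (x :: acc) ∧
        (PySem.List.insertBy before x acc).Pairwise (fun a b => before a b = true) := by
  intro acc
  induction acc with
  | nil => intro _ _; exact ⟨List.Perm.refl _, by simp [PySem.List.insertBy]⟩
  | cons y ys ih =>
    intro hpw htot
    rw [insertBy_cons]
    by_cases hxy : before x y = true
    · rw [if_pos hxy]
      refine ⟨List.Perm.refl _, ?_⟩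
      rw [List.pairwise_cons]
      refine ⟨?_, hpw⟩
      intro z hz
      rcases List.mem_cons.mp hz with rfl | hz
      · exact hxy
      · exact htrans _ _ _ hxy (List.rel_of_pairwise_cons hpw hz)
    · rw [if_neg hxy]
      have hyx : before y x = true := by
        rcases htot y (by simp) with h | h
        · exact absurd h hxy
        · exact h
      obtain ⟨hperm, hpw'⟩ := ih (List.Pairwise.of_cons hpw)
        (fun z hz => htot z (List.mem_cons_of_mem _ hz))
      refine ⟨?_, ?_⟩
      · exact (hperm.cons y).trans (List.Perm.swap x y ys)
      · rw [List.pairwise_cons]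
        refine ⟨?_, hpw'⟩
        intro z hz
        rcases (PySem.List.mem_insertBy before x z ys).mp hz with rfl | hz
        · exact hyx
        · exact List.rel_of_pairwise_cons hpw hz

lemma foldl_insertBy_perm_pairwise (before : String → String → Bool)
    (htrans : ∀ a b c, before a b = true → before b c = true → before a c = true) :
    ∀ (xs acc : List String), (acc ++ xs).Nodup →
      (∀ a b, a ∈ acc ++ xs → b ∈ acc ++ xs → a ≠ b → before a b = true ∨ before b a = true) →
      acc.Pairwise (fun a b => before a b = true) →
      (xs.foldl (fun acc x => PySem.List.insertBy before x acc) acc).Perm (acc ++ xs) ∧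
        (xs.foldl (fun acc x => PySem.List.insertBy before x acc) acc).Pairwise
          (fun a b => before a b = true) := by
  intro xs
  induction xs with
  | nil =>
    intro acc _ _ hpw
    simp only [List.foldl_nil, List.append_nil]
    exact ⟨List.Perm.refl _, hpw⟩
  | cons x xs ih =>
    intro acc hnd htot hpw
    have hdisj := (List.nodup_append.mp hnd).2.2
    have hxacc : ∀ y ∈ acc, y ≠ x := fun y hy h => hdisj y hy x (by simp) h
    obtain ⟨hperm1, hpw1⟩ := insertBy_perm_pairwise before htrans x acc hpw
      (fun y hy => htot x y (by simp) (by simp [hy]) (fun h => hxacc y hy h.symm))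
    have hperm2 : (PySem.List.insertBy before x acc ++ xs).Perm (acc ++ x :: xs) := by
      have h1 : (PySem.List.insertBy before x acc ++ xs).Perm (x :: (acc ++ xs)) := by
        simpa using hperm1.append_right xs
      exact h1.trans List.perm_middle.symm
    obtain ⟨hp, hw⟩ := ih (PySem.List.insertBy before x acc) (hperm2.nodup_iff.mpr hnd)
      (fun a b ha hb hne => htot a b (hperm2.mem_iff.mp ha) (hperm2.mem_iff.mp hb) hne) hpw1
    exact ⟨hp.trans hperm2, hw⟩

-- the sorted2 call of B produces any strictly pvLt2-increasing rearrangement of xs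
lemma sorted2_eq_of_perm_of_pairwise {κ₁ κ₂ : Type} [LinearOrder κ₁] [LinearOrder κ₂]
    (k1 : String → κ₁) (k2 : String → κ₂) (xs ys : List String)
    (hinj : ∀ a b, k2 a = k2 b → a = b)
    (hnd : xs.Nodup) (hperm : ys.Perm xs)
    (hpw : ys.Pairwise (fun a b => pvLt2 k1 k2 a b = true)) :
    PySem.List.sorted2 xs k1 k2 false = ys := by
  rw [sorted2_eq_foldl]
  obtain ⟨hp, hw⟩ := foldl_insertBy_perm_pairwise (pvLt2 k1 k2) (pvLt2_trans k1 k2) xs []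
    (by simpa using hnd)
    (by
      intro a b ha hb hne
      exact pvLt2_total k1 k2 a b (fun h => hne (hinj a b h)))
    (by simp)
  refine List.eq_of_perm_of_sorted ?_ hw hpw ?_
  · intro a b _ _ h1 h2
    exact absurd h2 (fun h => pvLt2_asymm k1 k2 a b h1 h)
  · simp only [List.nil_append] at hp
    exact hp.trans hperm.symm

-- A's second loop appends exactly the not-yet-present keys, in order
lemma foldl_cond_insert_items (f : String → Int) :
    ∀ (ks : List String) (sc : PySem.Dict String Int), ks.Nodup →
      (ks.foldl (fun sc k => if sc.contains k then sc else sc.insert k (f k)) sc).items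
        = sc.items ++ (ks.filter (fun k => !sc.contains k)).map (fun k => (k, f k)) := by
  intro ks
  induction ks with
  | nil => intro sc _; simp
  | cons k ks ih =>
    intro sc hnd
    have hnd' := hnd.of_cons
    by_cases hc : sc.contains k = true
    · simp only [List.foldl_cons, hc, if_true, List.filter_cons, Bool.not_true,
        Bool.false_eq_true, if_false]
      exact ih sc hnd'
    · have hc' : sc.contains k = false := by simpa using hc
      simp only [List.foldl_cons, hc', Bool.false_eq_true, if_false]
      rw [ih (sc.insert k (f k)) hnd']
      rw [PySem.Dict.items_insert_of_not_contains _ _ hc']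
      have hfilter : ks.filter (fun k' => !(sc.insert k (f k)).contains k')
          = ks.filter (fun k' => !sc.contains k') := by
        apply List.filter_congr
        intro k' hk'
        have hne : k' ≠ k := fun h => (List.nodup_cons.mp hnd).1 (h ▸ hk')
        rw [PySem.Dict.contains_insert]
        simp [hne]
      rw [hfilter]
      simp [hc', List.append_assoc]

-- rank-table facts about the literal reward list
lemma pvRank_keys :
    (PySem.Dict.ofList ((PySem.List.enumerate pvRewardOrder).map (fun p => (p.2, p.1)))).keys
      = pvRewardOrder := by decide

lemma pvRank_not_mem (k : String) (h : k ∉ pvRewardOrder) :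
    (PySem.Dict.ofList ((PySem.List.enumerate pvRewardOrder).map (fun p => (p.2, p.1)))).getD k 10 = 10 := by
  apply PySem.Dict.getD_of_not_contains
  rw [PySem.Dict.contains_eq_decide_mem_keys, pvRank_keys]
  simpa using h

lemma pvRank_lt_of_mem : ∀ k ∈ pvRewardOrder,
    (PySem.Dict.ofList ((PySem.List.enumerate pvRewardOrder).map (fun p => (p.2, p.1)))).getD k 10 < 10 := by
  decide

lemma pvRank_pairwise : pvRewardOrder.Pairwise (fun a b =>
    (PySem.Dict.ofList ((PySem.List.enumerate pvRewardOrder).map (fun p => (p.2, p.1)))).getD a 10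
      < (PySem.Dict.ofList ((PySem.List.enumerate pvRewardOrder).map (fun p => (p.2, p.1)))).getD b 10) := by
  decide

lemma pvRewardOrder_nodup : pvRewardOrder.Nodup := by decide

-- the key lemma: on a duplicate-free counts list the two inner computations agree
lemma pv_inner_eq (counts : List (String × Int)) (hnd : (counts.map Prod.fst).Nodup) :
    pvInnerA counts = pvInnerB counts := by
  unfold pvInnerA pvInnerB
  simp only []
  set d : PySem.Dict String Int := PySem.Dict.mk counts with hd
  set rank : PySem.Dict String Int :=
    PySem.Dict.ofList ((PySem.List.enumerate pvRewardOrder).map (fun p => (p.2, p.1))) with hrank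
  set f : String → String × Int := fun k => (k, d.getD k 0) with hf
  have hK : d.keys = counts.map Prod.fst := by simp [hd, PySem.Dict.keys_mk]
  have hKnd : d.keys.Nodup := by rw [hK]; exact hnd
  set R : List String := pvRewardOrder.filter (fun k => d.contains k) with hR
  have hRnd : R.Nodup := pvRewardOrder_nodup.filter _
  set SK : List String := PySem.List.sorted d.keys (fun k => k) false with hSK
  have hSKperm : SK.Perm d.keys := PySem.List.sorted_perm _ _ _
  have hSKnd : SK.Nodup := hSKperm.nodup_iff.mpr hKnd
  set T : List String := SK.filter (fun k => !decide (k ∈ R)) with hT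
  -- membership facts
  have hmemR : ∀ k, k ∈ R ↔ k ∈ pvRewardOrder ∧ k ∈ d.keys := by
    intro k
    rw [hR, List.mem_filter, PySem.Dict.contains_eq_decide_mem_keys]
    simp
  have hmemT : ∀ k, k ∈ T → k ∈ d.keys ∧ k ∉ pvRewardOrder := by
    intro k hk
    rw [hT, List.mem_filter] at hk
    obtain ⟨hk1, hk2⟩ := hk
    have hk1' : k ∈ d.keys := (PySem.List.mem_sorted _ _ _ _).mp hk1
    refine ⟨hk1', fun hmem => ?_⟩
    simp only [Bool.not_eq_eq_eq_not, Bool.not_true, decide_eq_false_iff_not] at hk2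
    exact hk2 ((hmemR k).mpr ⟨hmem, hk1'⟩)
  -- A's first loop
  have hAfold1 : pvRewardOrder.foldl (fun sc key =>
        if d.contains key then sc.insert key (d.getD key 0) else sc)
        (PySem.Dict.empty : PySem.Dict String Int)
      = R.foldl (fun sc key => sc.insert key (d.getD key 0))
        (PySem.Dict.empty : PySem.Dict String Int) := by
    rw [PySem.List.foldl_if_eq_foldl_filter]
  set sc1 : PySem.Dict String Int :=
    R.foldl (fun sc key => sc.insert key (d.getD key 0)) PySem.Dict.empty with hsc1
  have hkeys1 : sc1.keys = R := by
    rw [hsc1, PySem.Dict.keys_foldl_insert (f := fun _ key => d.getD key 0)]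
    show PySem.Set.update (PySem.Dict.empty : PySem.Dict String Int).keys R = R
    have : (PySem.Dict.empty : PySem.Dict String Int).keys = [] := rfl
    rw [this]
    show PySem.Set.ofList R = R
    exact PySem.Set.ofList_eq_self_of_nodup R hRnd
  have hitems1 : sc1.items = R.map f := by
    rw [hsc1]
    have := PySem.Dict.items_foldl_insert_fresh (l := R) (k := fun k => k)
      (v := fun k => d.getD k 0) (d := (PySem.Dict.empty : PySem.Dict String Int))
      (fun a _ => PySem.Dict.contains_empty a) (by simpa using hRnd)
    simpa [hf] using this
  have hcont1 : ∀ k, sc1.contains k = decide (k ∈ R) := by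
    intro k
    rw [PySem.Dict.contains_eq_decide_mem_keys, hkeys1]
  -- A's second loop
  have hA : (SK.foldl (fun sc key =>
        if sc.contains key then sc else sc.insert key (d.getD key 0)) sc1).items
      = (R ++ T).map f := by
    rw [foldl_cond_insert_items _ SK sc1 hSKnd, hitems1]
    rw [List.map_append]
    congr 1
    rw [hT]
    congr 1
    apply List.filter_congr
    intro k _
    rw [hcont1]
  -- rank facts
  have hn : (pvRewardOrder.length : Int) = 10 := by decide
  set k1 : String → Int := fun k => rank.getD k 10 with hk1
  have hlt2_of_rank : ∀ a b : String, k1 a < k1 b → pvLt2 k1 (fun k => k) a b = true := by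
    intro a b h
    simp [pvLt2, h]
  have hlt2_of_str : ∀ a b : String, k1 a = k1 b → a < b → pvLt2 k1 (fun k => k) a b = true := by
    intro a b h h2
    simp [pvLt2, h, h2]
  -- the target order is strictly increasing under pvLt2
  have hRpw : R.Pairwise (fun a b => pvLt2 k1 (fun k => k) a b = true) := by
    refine List.Pairwise.imp (fun h => hlt2_of_rank _ _ h) ?_
    exact (pvRank_pairwise).sublist List.filter_sublist
  have hTpw : T.Pairwise (fun a b => pvLt2 k1 (fun k => k) a b = true) := by
    have hle : T.Pairwise (fun a b : String => a ≤ b) :=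
      (PySem.List.sorted_pairwise d.keys (fun k => k)).sublist List.filter_sublist
    have hne : T.Pairwise (fun a b : String => a ≠ b) := (hSKnd.sublist List.filter_sublist)
    have hlt : T.Pairwise (fun a b : String => a < b) := by
      refine (hle.and hne).imp ?_
      exact fun ⟨h1, h2⟩ => lt_of_le_of_ne h1 h2
    refine hlt.imp_of_mem ?_
    intro a b ha hb hab
    have h10a : k1 a = 10 := pvRank_not_mem a (hmemT a ha).2
    have h10b : k1 b = 10 := pvRank_not_mem b (hmemT b hb).2
    exact hlt2_of_str a b (h10a.trans h10b.symm) hab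
  have hcross : ∀ a ∈ R, ∀ b ∈ T, pvLt2 k1 (fun k => k) a b = true := by
    intro a ha b hb
    apply hlt2_of_rank
    have h1 : k1 a < 10 := pvRank_lt_of_mem a ((hmemR a).mp ha).1
    have h2 : k1 b = 10 := pvRank_not_mem b (hmemT b hb).2
    omega
  have hpwRT : (R ++ T).Pairwise (fun a b => pvLt2 k1 (fun k => k) a b = true) := by
    rw [List.pairwise_append]
    exact ⟨hRpw, hTpw, hcross⟩
  -- the target order is a permutation of the keys
  have hpermRT : (R ++ T).Perm d.keys := by
    have hRperm : R.Perm (SK.filter (fun k => decide (k ∈ R))) := by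
      rw [List.perm_ext_iff_of_nodup hRnd (hSKnd.filter _)]
      intro k
      simp only [List.mem_filter, hSK, PySem.List.mem_sorted, decide_eq_true_eq]
      constructor
      · intro hk
        exact ⟨((hmemR k).mp hk).2, hk⟩
      · intro hk
        exact hk.2
    have := (hRperm.append_right T).trans
      ((List.filter_append_perm (fun k => decide (k ∈ R)) SK))
    exact this.trans hSKperm
  -- B's single sort hits exactly that order
  have hB : PySem.List.sorted2 d.keys k1 (fun k => k) false = R ++ T := by
    apply sorted2_eq_of_perm_of_pairwise k1 (fun k => k) d.keys (R ++ T)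
      (fun a b h => h) hKnd hpermRT hpwRT
  -- assemble
  rw [hAfold1, hA, hn, ← hK, hB]

-- ===== VERDICT (by name: the statement is the Claim_ definition above) =====
theorem format_stats_output_spec : Claim_equal_format_stats_output := by
  intro sd _ hpre
  obtain ⟨hnd0, hpre2⟩ := hpre
  have hA : format_stats_output sd
      = sd.map (fun cu =>
          (cu.1,
            ((PySem.List.sorted cu.2 (fun item => (PySem.Dict.mk item.2).getD "total" 0) true).foldl
              (fun cd uc => cd.insert uc.1 (pvInnerA uc.2))
              (PySem.Dict.empty : PySem.Dict String (List (String × Int)))).items)) :=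
    pvDictbuild_eq_map sd _ hnd0
  rw [show Spec_format_stats_output sd (format_stats_output sd)
        = (format_stats_output sd = format_stats_output_alt sd) from rfl, hA]
  show _ = sd.map (fun cu =>
    (cu.1,
      (PySem.List.sorted cu.2 (fun it => (PySem.Dict.mk it.2).getD "total" 0) true).map
        (fun uc => (uc.1, pvInnerB uc.2))))
  apply List.map_congr_left
  intro cu hcu
  obtain ⟨hndu, hndc⟩ := hpre2 cu hcu
  have hsorted_nd : ((PySem.List.sorted cu.2 (fun item => (PySem.Dict.mk item.2).getD "total" 0) true).map Prod.fst).Nodup := by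
    have hperm : (PySem.List.sorted cu.2 (fun item => (PySem.Dict.mk item.2).getD "total" 0) true).Perm cu.2 :=
      PySem.List.sorted_perm _ _ _
    exact ((hperm.map Prod.fst).nodup_iff).mpr hndu
  refine congrArg (Prod.mk cu.1) ?_
  rw [pvDictbuild_eq_map _ (fun uc => pvInnerA uc.2) hsorted_nd]
  apply List.map_congr_left
  intro uc huc
  have huc' : uc ∈ cu.2 := (PySem.List.mem_sorted _ _ _ _).mp huc
  exact congrArg (Prod.mk uc.1) (pv_inner_eq uc.2 (hndc uc huc'))
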